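-- pv_equiv track=rewrite | github.com/SauersML/ferromic | stats/tagging_snp_inversion_dosages.py | coalesce_indices_to_runs
-- ===== SOURCE A (Python) =====
-- from typing import Dict, List, Tuple, Set, Iterable, Optional, DefaultDict
--
-- COALESCE_MAX_GAP   = 256*1024  # merge indices if byte gap ≤ 256 KiB
--
-- COALESCE_MAX_RUN   = 8*1024*1024  # cap each ranged request to ~8 MiB
--
-- def coalesce_indices_to_runs(indices: List[int], bpf: int,
--                              max_gap: int = COALESCE_MAX_GAP,
--                              max_run: int = COALESCE_MAX_RUN) -> List[Tuple[int,int]]: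
--     if not indices: return []
--     idxs = sorted(set(indices))
--     runs = []
--     i0 = prev = idxs[0]
--     run_bytes = bpf
--     for x in idxs[1:]:
--         byte_gap = (x - prev) * bpf
--         if byte_gap <= max_gap and (run_bytes + byte_gap + bpf) <= max_run:
--             run_bytes += byte_gap + bpf
--             prev = x
--         else:
--             runs.append((i0, prev))
--             i0 = prev = x
--             run_bytes = bpf
--     runs.append((i0, prev))
--     return runs
-- ===== SOURCE B (Python) =====
-- COALESCE_MAX_GAP = 256*1024
-- COALESCE_MAX_RUN = 8*1024*1024
--
-- def coalesce_indices_to_runs(indices, bpf,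
--                              max_gap=COALESCE_MAX_GAP,
--                              max_run=COALESCE_MAX_RUN):
--     if not indices:
--         return []
--     idxs = sorted(set(indices))
--     # pass 1: split into maximal gap-segments (byte gap between neighbours <= max_gap)
--     segments = []
--     cur = [idxs[0]]
--     for x in idxs[1:]:
--         if (x - cur[-1]) * bpf <= max_gap:
--             cur.append(x)
--         else:
--             segments.append(cur)
--             cur = [x]
--     segments.append(cur)
--     # pass 2: within each gap-segment only the size cap can break a run
--     runs = []
--     for seg in segments:
--         i0 = prev = seg[0]
--         run_bytes = bpf
--         for x in seg[1:]:
--             byte_gap = (x - prev) * bpf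
--             if run_bytes + byte_gap + bpf <= max_run:
--                 run_bytes += byte_gap + bpf
--                 prev = x
--             else:
--                 runs.append((i0, prev))
--                 i0 = prev = x
--                 run_bytes = bpf
--         runs.append((i0, prev))
--     return runs
-- ===== Notes on version B (the rewrite author's own statement) =====
-- stated objective: alternative
-- what changed: B splits the work into two passes: first it cuts the sorted-deduped indices into maximal gap-bounded segments, then it applies only the size cap inside each segment, instead of A's single loop deciding both conditions at once.
import Mathlib
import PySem

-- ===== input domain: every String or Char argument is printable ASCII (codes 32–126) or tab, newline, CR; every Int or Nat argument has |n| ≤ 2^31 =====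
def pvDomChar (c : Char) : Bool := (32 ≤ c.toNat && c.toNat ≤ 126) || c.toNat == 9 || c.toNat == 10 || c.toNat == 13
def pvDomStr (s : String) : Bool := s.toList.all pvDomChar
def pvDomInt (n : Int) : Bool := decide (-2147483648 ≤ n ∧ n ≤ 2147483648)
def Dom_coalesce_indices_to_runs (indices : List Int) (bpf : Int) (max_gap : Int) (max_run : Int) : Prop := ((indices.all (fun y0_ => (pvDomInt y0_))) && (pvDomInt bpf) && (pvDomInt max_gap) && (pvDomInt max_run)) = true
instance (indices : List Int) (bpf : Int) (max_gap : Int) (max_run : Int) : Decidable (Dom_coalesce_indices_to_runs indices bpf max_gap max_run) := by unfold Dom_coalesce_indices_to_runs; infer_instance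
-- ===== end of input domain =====

-- B re-implements the single merge loop as two passes (gap-segmentation, then size-capping); same results, same cost ("alternative").

-- ===== PORT A =====
-- A's for-loop over idxs[1:] with state (i0, prev, run_bytes, runs); the [] case is the trailing runs.append((i0, prev)).
def pvALoop (bpf max_gap max_run : Int) : List Int → Int → Int → Int → List (Int × Int) → List (Int × Int)
  | [], i0, prev, _, runs => runs ++ [(i0, prev)]
  | x :: rest, i0, prev, run_bytes, runs =>
    let byte_gap := (x - prev) * bpf
    if byte_gap ≤ max_gap ∧ run_bytes + byte_gap + bpf ≤ max_run then
      pvALoop bpf max_gap max_run rest i0 x (run_bytes + byte_gap + bpf) runs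
    else
      pvALoop bpf max_gap max_run rest x x bpf (runs ++ [(i0, prev)])

def coalesce_indices_to_runs (indices : List Int) (bpf : Int) (max_gap : Int) (max_run : Int) : List (Int × Int) :=
  if indices = [] then []
  else
    match PySem.List.sorted (PySem.Set.ofList indices) (fun x => x) false with
    | [] => []  -- unreachable: sorted(set(indices)) of a nonempty list is nonempty
    | h :: t => pvALoop bpf max_gap max_run t h h bpf []

-- ===== PORT B =====
-- B's pass-1 loop: cur[-1] is (cur.getLastD 0); cur is never empty, so the default is unused.
def pvBSeg (bpf max_gap : Int) : List Int → List Int → List (List Int) → List (List Int)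
  | [], cur, segs => segs ++ [cur]
  | x :: rest, cur, segs =>
    if (x - cur.getLastD 0) * bpf ≤ max_gap then
      pvBSeg bpf max_gap rest (cur ++ [x]) segs
    else
      pvBSeg bpf max_gap rest [x] (segs ++ [cur])

-- B's pass-2 inner loop over seg[1:]; the [] case is the per-segment trailing runs.append((i0, prev)).
def pvBSize (bpf max_run : Int) : List Int → Int → Int → Int → List (Int × Int) → List (Int × Int)
  | [], i0, prev, _, runs => runs ++ [(i0, prev)]
  | x :: rest, i0, prev, run_bytes, runs =>
    let byte_gap := (x - prev) * bpf
    if run_bytes + byte_gap + bpf ≤ max_run then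
      pvBSize bpf max_run rest i0 x (run_bytes + byte_gap + bpf) runs
    else
      pvBSize bpf max_run rest x x bpf (runs ++ [(i0, prev)])

-- B's pass-2 outer loop over the segments (each segment is nonempty; [] branch unreachable).
def pvBRun (bpf max_run : Int) (segments : List (List Int)) : List (Int × Int) :=
  segments.foldl (fun runs seg =>
    match seg with
    | [] => runs
    | s0 :: st => pvBSize bpf max_run st s0 s0 bpf runs) []

def coalesce_indices_to_runs_alt (indices : List Int) (bpf : Int) (max_gap : Int) (max_run : Int) : List (Int × Int) :=
  if indices = [] then []
  else
    match PySem.List.sorted (PySem.Set.ofList indices) (fun x => x) false with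
    | [] => []  -- unreachable: sorted(set(indices)) of a nonempty list is nonempty
    | h :: t => pvBRun bpf max_run (pvBSeg bpf max_gap t [h] [])

-- ===== PRECONDITION & SPEC =====
def Spec_coalesce_indices_to_runs (indices : List Int) (bpf : Int) (max_gap : Int) (max_run : Int) (out : List (Int × Int)) : Prop := out = coalesce_indices_to_runs_alt indices bpf max_gap max_run
instance (indices : List Int) (bpf : Int) (max_gap : Int) (max_run : Int) (out : List (Int × Int)) : Decidable (Spec_coalesce_indices_to_runs indices bpf max_gap max_run out) := by unfold Spec_coalesce_indices_to_runs; infer_instance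

-- ===== CLAIM (what is proved, stated in full; the proofs are below) =====
def Claim_equal_coalesce_indices_to_runs : Prop := ∀ (indices : List Int) (bpf : Int) (max_gap : Int) (max_run : Int), Dom_coalesce_indices_to_runs indices bpf max_gap max_run → Spec_coalesce_indices_to_runs indices bpf max_gap max_run (coalesce_indices_to_runs indices bpf max_gap max_run)

-- ===== LEMMAS AND PROOFS =====

-- split a list at the first gap-break relative to the running previous element
def pvGSplit (bpf max_gap : Int) : List Int → Int → (List Int × List Int)
  | [], _ => ([], [])
  | x :: rest, prev =>
    if (x - prev) * bpf ≤ max_gap then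
      let p := pvGSplit bpf max_gap rest x
      (x :: p.1, p.2)
    else ([], x :: rest)

theorem pvGSplit_snd_len (bpf max_gap : Int) (l : List Int) (prev : Int) :
    (pvGSplit bpf max_gap l prev).2.length ≤ l.length := by
  induction l generalizing prev with
  | nil => simp [pvGSplit]
  | cons x rest ih =>
    simp only [pvGSplit]
    split
    · exact le_trans (ih x) (Nat.le_succ _)
    · simp

-- A's loop factored through the gap-split: inside the first gap-segment only the size cap fires
theorem pvALoop_split (bpf max_gap max_run : Int) (l : List Int)
    (i0 prev rb : Int) (runs : List (Int × Int)) :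
    pvALoop bpf max_gap max_run l i0 prev rb runs =
      (match pvGSplit bpf max_gap l prev with
       | (ins, []) => pvBSize bpf max_run ins i0 prev rb runs
       | (ins, y :: rest') => pvALoop bpf max_gap max_run rest' y y bpf
            (pvBSize bpf max_run ins i0 prev rb runs)) := by
  induction l generalizing i0 prev rb runs with
  | nil => simp [pvGSplit, pvALoop, pvBSize]
  | cons x rest ih =>
    by_cases hg : (x - prev) * bpf ≤ max_gap
    · by_cases hs : rb + (x - prev) * bpf + bpf ≤ max_run
      · simp only [pvALoop, pvGSplit, if_pos hg, if_pos (And.intro hg hs)]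
        rw [ih]
        rcases h : pvGSplit bpf max_gap rest x with ⟨ins, outs⟩
        cases outs <;> simp [pvBSize, if_pos hs]
      · have : ¬ ((x - prev) * bpf ≤ max_gap ∧ rb + (x - prev) * bpf + bpf ≤ max_run) := by
          intro h; exact hs h.2
        simp only [pvALoop, pvGSplit, if_pos hg, if_neg this]
        rw [ih]
        rcases h : pvGSplit bpf max_gap rest x with ⟨ins, outs⟩
        cases outs <;> simp [pvBSize, if_neg hs]
    · have : ¬ ((x - prev) * bpf ≤ max_gap ∧ rb + (x - prev) * bpf + bpf ≤ max_run) := by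
        intro h; exact hg h.1
      simp only [pvALoop, pvGSplit, if_neg hg, if_neg this]
      simp [pvBSize]

-- the segment accumulator only ever grows at the back
theorem pvBSeg_acc (bpf max_gap : Int) (l cur : List Int) (segs : List (List Int)) :
    pvBSeg bpf max_gap l cur segs = segs ++ pvBSeg bpf max_gap l cur [] := by
  induction l generalizing cur segs with
  | nil => simp [pvBSeg]
  | cons x rest ih =>
    simp only [pvBSeg]
    split
    · exact ih _ _
    · rw [ih _ (segs ++ [cur]), ih _ ([] ++ [cur])]
      simp

-- B's segmentation factored through the same gap-split
theorem pvBSeg_split (bpf max_gap : Int) (l cur : List Int) (prev : Int)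
    (hcur : cur ≠ []) (hlast : cur.getLastD 0 = prev) :
    pvBSeg bpf max_gap l cur [] =
      (match pvGSplit bpf max_gap l prev with
       | (ins, []) => [cur ++ ins]
       | (ins, y :: rest') => (cur ++ ins) :: pvBSeg bpf max_gap rest' [y] []) := by
  induction l generalizing cur prev with
  | nil => simp [pvBSeg, pvGSplit]
  | cons x rest ih =>
    by_cases hg : (x - prev) * bpf ≤ max_gap
    · simp only [pvBSeg, pvGSplit, hlast, if_pos hg]
      rw [ih (cur ++ [x]) x (by simp) (by simp)]
      rcases h : pvGSplit bpf max_gap rest x with ⟨ins, outs⟩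
      cases outs <;> simp
    · simp only [pvBSeg, pvGSplit, hlast, if_neg hg]
      rw [pvBSeg_acc]
      simp

-- main loop equivalence, by strong induction on the list length
theorem pvMain (bpf max_gap max_run : Int) : ∀ (n : ℕ) (t : List Int), t.length ≤ n →
    ∀ (h : Int) (runs : List (Int × Int)),
    pvALoop bpf max_gap max_run t h h bpf runs =
      (pvBSeg bpf max_gap t [h] []).foldl (fun runs seg =>
        match seg with
        | [] => runs
        | s0 :: st => pvBSize bpf max_run st s0 s0 bpf runs) runs := by
  intro n
  induction n with
  | zero =>
    intro t ht h runs
    have : t = [] := List.eq_nil_of_length_eq_zero (Nat.le_zero.mp ht)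
    subst this
    simp [pvALoop, pvBSeg, pvBSize]
  | succ n ih =>
    intro t ht h runs
    rw [pvALoop_split, pvBSeg_split bpf max_gap t [h] h (by simp) (by simp)]
    rcases hsp : pvGSplit bpf max_gap t h with ⟨ins, outs⟩
    cases outs with
    | nil => simp only [List.singleton_append, List.foldl_cons, List.foldl_nil]
    | cons y rest' =>
      have hlen : rest'.length ≤ n := by
        have := pvGSplit_snd_len bpf max_gap t h
        rw [hsp] at this
        simp at this
        omega
      simp only [List.foldl_cons, List.singleton_append]
      rw [ih rest' hlen y (pvBSize bpf max_run ins h h bpf runs)]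

-- ===== VERDICT (by name: the statement is the Claim_ definition above) =====
theorem coalesce_indices_to_runs_spec : Claim_equal_coalesce_indices_to_runs := by
  intro indices bpf max_gap max_run _
  unfold Spec_coalesce_indices_to_runs coalesce_indices_to_runs coalesce_indices_to_runs_alt
  split
  · rfl
  · rcases h : PySem.List.sorted (PySem.Set.ofList indices) (fun x => x) false with _ | ⟨hd, tl⟩
    · rfl
    · exact pvMain bpf max_gap max_run tl.length tl le_rfl hd []
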